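-- pv_equiv track=rewrite | github.com/NathyPapst/Projetos-em-Python | Trabalho-de-Matrizes/main.py | centro_colunas
-- ===== SOURCE A (Python) =====
-- def centro_colunas (soma_das_colunas): #função para descobrir o centro de gravidade das linhas
--     lista_soma_esquerda = [] #criação da lista das somas a esquerda da coluna selecionada
--     lista_soma_direita = [] #criação da lista das somas a direita da coluna selecionada
--     for y in range (1,len(soma_das_colunas)-1): #repetição passando pelas colunas começando da segunda e indo até a penúltima
--         indice_cima = 0
--         indice_baixo = len(soma_das_colunas)-1
--         soma_esquerda = 0
--         soma_direita = 0
--         while indice_cima < y: #repetição enquanto o índice de cima for menor que y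
--             soma_esquerda += soma_das_colunas[indice_cima] #efetua a soma das colunas a esquerda da coluna selecionada
--             indice_cima += 1 #aumenta o tamanho do índice de cima
--         lista_soma_esquerda.append(soma_esquerda) #adiciona a soma da esquerda a lista de somas da esquerda
--         while indice_baixo > y: #repetição enquanto o índice da direita é maior que y
--             soma_direita += soma_das_colunas[indice_baixo] #efetua a soma das colunas a direita da linha selecionada
--             indice_baixo -= 1 #diminui o tamanho do índice de baixo
--         lista_soma_direita.append(soma_direita) #adiciona a soma da direita a lista de somas da direita
--
--     menor_dif_colunas = 100
--     indice_menor_dif_colunas = 0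
--     for w in range (len(lista_soma_esquerda)): #repetição passando pela lista da soma da esquerda
--         dif = abs(lista_soma_esquerda[w] - lista_soma_direita[w]) #efetua a subtração modular entre a lista das somas da esquerda pela lista das somas da direita
--         if dif < menor_dif_colunas: #condicional para quando a diferença for menor diferença das linhas
--             menor_dif_colunas = dif #diferença se tranforma na menor diferença das linhas
--             indice_menor_dif_colunas = w+2
--     return indice_menor_dif_colunas
-- ===== SOURCE B (Python) =====
-- def centro_colunas(soma_das_colunas):
--     total = sum(soma_das_colunas)
--     esquerda = 0
--     menor_dif_colunas = 100
--     indice_menor_dif_colunas = 0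
--     for y in range(1, len(soma_das_colunas) - 1):
--         esquerda += soma_das_colunas[y - 1]
--         direita = total - esquerda - soma_das_colunas[y]
--         dif = abs(esquerda - direita)
--         if dif < menor_dif_colunas:
--             menor_dif_colunas = dif
--             indice_menor_dif_colunas = y + 1
--     return indice_menor_dif_colunas
-- ===== Notes on version B (the rewrite author's own statement) =====
-- stated objective: faster
-- what changed: replaces the per-column inner while-loops (re-summing left and right parts for every column) and the two intermediate lists by a single pass keeping a running prefix sum, with the right sum obtained as total - prefix - current
import Mathlib
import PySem

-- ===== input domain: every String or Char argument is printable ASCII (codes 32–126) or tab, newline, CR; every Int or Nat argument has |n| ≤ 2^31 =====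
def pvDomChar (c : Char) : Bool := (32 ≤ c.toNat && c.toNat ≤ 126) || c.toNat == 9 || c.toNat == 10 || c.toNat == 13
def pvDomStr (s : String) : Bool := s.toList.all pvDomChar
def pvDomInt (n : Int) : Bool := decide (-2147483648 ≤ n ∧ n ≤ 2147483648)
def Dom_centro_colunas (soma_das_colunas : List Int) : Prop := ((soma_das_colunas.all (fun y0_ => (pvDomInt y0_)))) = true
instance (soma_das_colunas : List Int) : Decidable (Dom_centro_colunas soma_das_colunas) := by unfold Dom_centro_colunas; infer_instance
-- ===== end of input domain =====

-- B replaces A's per-column re-summing (two inner while loops and two intermediate lists)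
-- by a single pass keeping a running prefix sum, with the right-hand sum obtained as
-- total - prefix - current; objective: faster.

-- ===== PORT A =====
-- 'while indice_cima < y: soma_esquerda += soma_das_colunas[indice_cima]; indice_cima += 1'
-- (A's indices are always in range, so pyGetD's default 0 is only a totality guard)
def whileLeft (xs : List Int) (i y acc : Int) : Int :=
  if i < y then whileLeft xs (i + 1) y (acc + PySem.List.pyGetD xs i 0) else acc
termination_by (y - i).toNat
decreasing_by omega

-- 'while indice_baixo > y: soma_direita += soma_das_colunas[indice_baixo]; indice_baixo -= 1'
def whileRight (xs : List Int) (i y acc : Int) : Int :=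
  if y < i then whileRight xs (i - 1) y (acc + PySem.List.pyGetD xs i 0) else acc
termination_by (i - y).toNat
decreasing_by omega

def centro_colunas (soma_das_colunas : List Int) : Int :=
  let n : Int := soma_das_colunas.length
  let listas := (PySem.List.pyRange 1 (n - 1) 1).foldl
    (fun (ls : List Int × List Int) y =>
      (ls.1 ++ [whileLeft soma_das_colunas 0 y 0],
       ls.2 ++ [whileRight soma_das_colunas (n - 1) y 0])) ([], [])
  let res := (PySem.List.pyRange 0 (listas.1.length : Int) 1).foldl
    (fun (st : Int × Int) w =>
      let dif := |PySem.List.pyGetD listas.1 w 0 - PySem.List.pyGetD listas.2 w 0|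
      if dif < st.1 then (dif, w + 2) else st) (100, 0)
  res.2

-- ===== PORT B =====
def centro_colunas_alt (soma_das_colunas : List Int) : Int :=
  let total := soma_das_colunas.sum
  let st := (PySem.List.pyRange 1 ((soma_das_colunas.length : Int) - 1) 1).foldl
    (fun (st : Int × Int × Int) y =>
      let esquerda := st.2.2 + PySem.List.pyGetD soma_das_colunas (y - 1) 0
      let direita := total - esquerda - PySem.List.pyGetD soma_das_colunas y 0
      let dif := |esquerda - direita|
      if dif < st.1 then (dif, y + 1, esquerda) else (st.1, st.2.1, esquerda))
    (100, 0, 0)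
  st.2.1

-- ===== PRECONDITION & SPEC =====
def Spec_centro_colunas (soma_das_colunas : List Int) (out : Int) : Prop := out = centro_colunas_alt soma_das_colunas
instance (soma_das_colunas : List Int) (out : Int) : Decidable (Spec_centro_colunas soma_das_colunas out) := by unfold Spec_centro_colunas; infer_instance

-- ===== CLAIM (what is proved, stated in full; the proofs are below) =====
def Claim_equal_centro_colunas : Prop := ∀ (soma_das_colunas : List Int), Dom_centro_colunas soma_das_colunas → Spec_centro_colunas soma_das_colunas (centro_colunas soma_das_colunas)

-- ===== LEMMAS AND PROOFS =====

-- sum of xs[j] over indices a ≤ j < b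
def pvS (xs : List Int) (a b : Int) : Int :=
  ((PySem.List.pyRange a b 1).map (fun j => PySem.List.pyGetD xs j 0)).sum

theorem whileLeft_eq (xs : List Int) : ∀ (i y acc : Int),
    whileLeft xs i y acc = acc + pvS xs i y := by
  intro i y acc
  fun_induction whileLeft xs i y acc with
  | case1 i acc h ih =>
      rw [ih]; simp only [pvS]
      rw [PySem.List.pyRange_one_cons h]
      simp; ring
  | case2 i acc h =>
      simp only [pvS]
      rw [PySem.List.pyRange_one_eq_nil (by omega)]
      simp

theorem whileRight_eq (xs : List Int) : ∀ (i y acc : Int),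
    whileRight xs i y acc = acc + pvS xs (y + 1) (i + 1) := by
  intro i y acc
  fun_induction whileRight xs i y acc with
  | case1 i acc h ih =>
      rw [ih]; simp only [pvS]
      rw [show i - 1 + 1 = i by ring, PySem.List.pyRange_one_succ_right (by omega)]
      simp; ring
  | case2 i acc h =>
      simp only [pvS]
      rw [PySem.List.pyRange_one_eq_nil (by omega)]
      simp

-- the reference step both ports' loops reduce to (at column y = k + 1)
def pvStep (xs : List Int) (st : Int × Int) (k : Nat) : Int × Int :=
  let dif := |pvS xs 0 ((k : Int) + 1) - pvS xs ((k : Int) + 2) (xs.length : Int)|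
  if dif < st.1 then (dif, (k : Int) + 2) else st

theorem A_eq_ref (xs : List Int) :
    centro_colunas xs =
      ((List.range ((xs.length : Int) - 1 - 1).toNat).foldl (pvStep xs) (100, 0)).2 := by
  simp only [centro_colunas]
  rw [PySem.List.foldl_prod_mk (f := fun acc y => acc ++ [whileLeft xs 0 y 0])
        (g := fun acc y => acc ++ [whileRight xs ((xs.length : Int) - 1) y 0]),
      PySem.List.foldl_append_singleton_eq_map, PySem.List.foldl_append_singleton_eq_map]
  simp only [List.nil_append, List.length_map, PySem.List.length_pyRange_one,
    PySem.List.pyRange_zero_natCast, List.foldl_map]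
  congr 1
  apply PySem.List.foldl_congr_mem
  intro acc k hk
  rw [List.mem_range] at hk
  rw [PySem.List.pyGetD_map_pyRange_one _ _ _ _ _ hk, PySem.List.pyGetD_map_pyRange_one _ _ _ _ _ hk,
      whileLeft_eq, whileRight_eq]
  simp only [pvStep, zero_add]
  ring_nf

theorem sum_eq_pvS (xs : List Int) : xs.sum = pvS xs 0 (xs.length : Int) := by
  rw [pvS, PySem.List.map_pyGetD_pyRange_zero']

theorem pvS_succ (xs : List Int) (m : Nat) :
    pvS xs 0 ((m : Int) + 1) = pvS xs 0 m + PySem.List.pyGetD xs m 0 := by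
  simp only [pvS]
  rw [PySem.List.pyRange_one_succ_right (by omega)]
  simp

theorem pvS_split (xs : List Int) (m : Nat) (h : (m : Int) + 2 ≤ (xs.length : Int)) :
    pvS xs 0 (xs.length : Int) =
      pvS xs 0 ((m : Int) + 1) + PySem.List.pyGetD xs ((m : Int) + 1) 0
        + pvS xs ((m : Int) + 2) (xs.length : Int) := by
  simp only [pvS]
  rw [PySem.List.pyRange_one_append 0 ((m : Int) + 1) (xs.length : Int) (by omega) (by omega),
      PySem.List.pyRange_one_append ((m : Int) + 1) ((m : Int) + 2) (xs.length : Int) (by omega) h,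
      show ((m : Int) + 2) = ((m : Int) + 1) + 1 by ring, PySem.List.pyRange_one_singleton]
  simp; ring

-- B's loop with its extra running-prefix accumulator tracks the reference fold
theorem B_loop (xs : List Int) (m : Nat) (hm : m ≤ ((xs.length : Int) - 1 - 1).toNat) :
    (List.range m).foldl
      (fun (st : Int × Int × Int) (k : Nat) =>
        let y : Int := 1 + (k : Int)
        let esquerda := st.2.2 + PySem.List.pyGetD xs (y - 1) 0
        let direita := xs.sum - esquerda - PySem.List.pyGetD xs y 0
        let dif := |esquerda - direita|
        if dif < st.1 then (dif, y + 1, esquerda) else (st.1, st.2.1, esquerda))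
      (100, 0, 0)
    = (((List.range m).foldl (pvStep xs) (100, 0)).1,
       ((List.range m).foldl (pvStep xs) (100, 0)).2, pvS xs 0 (m : Int)) := by
  induction m with
  | zero => simp [pvS, PySem.List.pyRange_one_eq_nil]
  | succ m ih =>
      rw [List.range_succ, List.foldl_append, List.foldl_append, ih (by omega)]
      simp only [List.foldl_cons, List.foldl_nil]
      have hlen : (m : Int) + 2 ≤ (xs.length : Int) := by omega
      have hesq : pvS xs 0 ((m : Int)) + PySem.List.pyGetD xs (1 + (m : Int) - 1) 0
          = pvS xs 0 ((m : Int) + 1) := by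
        rw [show (1 + (m : Int) - 1) = (m : Int) by ring, pvS_succ]
      have hd2 : |pvS xs 0 ((m : Int) + 1) -
            (xs.sum - pvS xs 0 ((m : Int) + 1) - PySem.List.pyGetD xs (1 + (m : Int)) 0)|
          = |pvS xs 0 ((m : Int) + 1) - pvS xs ((m : Int) + 2) (xs.length : Int)| := by
        rw [sum_eq_pvS, pvS_split xs m hlen, show (1 + (m : Int)) = (m : Int) + 1 by ring]
        congr 1; ring
      simp only [pvStep, hesq, hd2]
      push_cast
      rw [show (1 : Int) + (m : Int) + 1 = (m : Int) + 2 by ring]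
      split_ifs with h <;> simp

theorem B_eq_ref (xs : List Int) :
    centro_colunas_alt xs =
      ((List.range ((xs.length : Int) - 1 - 1).toNat).foldl (pvStep xs) (100, 0)).2 := by
  simp only [centro_colunas_alt]
  rw [PySem.List.pyRange_one 1 ((xs.length : Int) - 1), List.foldl_map]
  exact congrArg (fun p => p.2.1) (B_loop xs ((xs.length : Int) - 1 - 1).toNat le_rfl)

-- ===== VERDICT (by name: the statement is the Claim_ definition above) =====
theorem centro_colunas_spec : Claim_equal_centro_colunas := by
  intro xs _
  show centro_colunas xs = centro_colunas_alt xs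
  rw [A_eq_ref, B_eq_ref]
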